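-- pv_equiv track=rewrite | github.com/erlendps/AdventOfCode | aoc23/day3/main.py | find_nums_in_line
-- ===== SOURCE A (Python) =====
-- def find_nums_in_line(line):
--     if not line:
--         return None
--     line_length = len(line)
--     j = 0
--     current_num = ""
--     nums = []
--     while j < line_length:
--         if not line[j].isnumeric():
--             j += 1
--             continue
--         h = j + 1
--         current_num += line[j]
--         while h < line_length and line[h].isnumeric():
--             current_num += line[h]
--             h += 1
--         number = {
--             "num": int(current_num),
--             "start": j - 1 if j > 0 else j,
--             "stop": h if h < line_length else h - 1,
--         }
--         nums.append(number)
--         current_num = ""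
--         j = h
--     return nums
-- ===== SOURCE B (Python) =====
-- def find_nums_in_line(line):
--     if not line:
--         return None
--     n = len(line)
--     # stage 1: split the line into maximal runs of equal numeric-ness,
--     # built back-to-front by prepending
--     runs = []
--     for c in reversed(line):
--         k = c.isnumeric()
--         if runs and runs[0][0] == k:
--             runs[0] = (k, c + runs[0][1])
--         else:
--             runs.insert(0, (k, c))
--     # stage 2: walk the runs with a running index, emitting an entry per numeric run
--     nums, idx = [], 0
--     for is_num, chunk in runs:
--         if is_num:
--             stop = idx + len(chunk)
--             nums.append({
--                 "num": int(chunk),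
--                 "start": idx - 1 if idx > 0 else idx,
--                 "stop": stop if stop < n else stop - 1,
--             })
--         idx += len(chunk)
--     return nums
-- ===== Notes on version B (the rewrite author's own statement) =====
-- stated objective: alternative
-- what changed: B replaces A's single two-pointer index scan by two staged passes: it first materializes an intermediate list of maximal same-key (numeric/non-numeric) runs, built back-to-front by prepending, and then a second pass walks the runs with a running index, emitting one entry per numeric run.
import Mathlib
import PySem

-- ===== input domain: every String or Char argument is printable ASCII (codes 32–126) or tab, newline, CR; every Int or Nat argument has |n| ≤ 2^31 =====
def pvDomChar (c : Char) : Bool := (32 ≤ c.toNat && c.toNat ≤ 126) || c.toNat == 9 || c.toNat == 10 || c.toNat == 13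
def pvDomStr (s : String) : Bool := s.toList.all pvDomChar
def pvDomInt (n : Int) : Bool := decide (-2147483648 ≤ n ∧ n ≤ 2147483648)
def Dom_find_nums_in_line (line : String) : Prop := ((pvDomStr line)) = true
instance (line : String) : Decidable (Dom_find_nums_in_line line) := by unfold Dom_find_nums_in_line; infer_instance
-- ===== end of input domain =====

-- B replaces A's single two-pointer index scan by two staged passes: it first materializes an
-- intermediate list of maximal same-key (numeric / non-numeric) runs, built back-to-front by
-- prepending, then a second pass walks the runs with a running index, emitting one entry per
-- numeric run; return values agree on every input (proved below without any precondition).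
-- str.isnumeric is ported as PySem.Chars.isdigit (exact on the ASCII domain), and int(chunk),
-- which never raises on the ASCII digit runs it is applied to, as (PySem.Int.ofChars? _).getD 0
-- in both ports.

-- ===== PORT A =====
-- inner while: h scans past the digit run, current_num accumulates its characters
def pvScanA (cs : List Char) (L h : Nat) (cur : List Char) : Nat × List Char :=
  if hcond : h < L ∧ PySem.Chars.isdigit ((cs[h]?).getD ' ') then
    pvScanA cs L (h + 1) (cur ++ [(cs[h]?).getD ' '])
  else (h, cur)
termination_by L - h
decreasing_by obtain ⟨h1, _⟩ := hcond; omega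

theorem pvScanA_ge (cs : List Char) (L h : Nat) (cur : List Char) :
    h ≤ (pvScanA cs L h cur).1 := by
  fun_induction pvScanA with
  | case1 h cur _ ih => omega
  | case2 => simp

-- outer while over j
def pvLoopA (cs : List Char) (L j : Nat) : List (List (String × Int)) :=
  if hj : j < L then
    if PySem.Chars.isdigit ((cs[j]?).getD ' ') then
      let p := pvScanA cs L (j + 1) [(cs[j]?).getD ' ']
      [("num", (PySem.Int.ofChars? p.2).getD 0),
       ("start", if 0 < j then (j : Int) - 1 else (j : Int)),
       ("stop", if p.1 < L then (p.1 : Int) else (p.1 : Int) - 1)] :: pvLoopA cs L p.1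
    else pvLoopA cs L (j + 1)
  else []
termination_by L - j
decreasing_by
  · have := pvScanA_ge cs L (j + 1) [(cs[j]?).getD ' ']; omega
  · omega

def find_nums_in_line (line : String) : Option (List (List (String × Int))) :=
  let cs := line.toList
  if cs.isEmpty then none
  else some (pvLoopA cs cs.length 0)

-- ===== PORT B =====
-- stage 1: for c in reversed(line), prepending: runs[0] extended when its key matches,
-- otherwise a fresh run is inserted at the front — structural recursion on the tail
def pvRuns : List Char → List (Bool × List Char)
  | [] => []
  | c :: t =>
    let k := PySem.Chars.isdigit c
    match pvRuns t with
    | (k', r) :: rest => if k' == k then (k, c :: r) :: rest else (k, [c]) :: (k', r) :: rest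
    | [] => [(k, [c])]

-- stage 2: walk the runs with a running index idx, one entry per numeric run
def pvBuild (n : Nat) (idx : Nat) : List (Bool × List Char) → List (List (String × Int))
  | [] => []
  | (k, chunk) :: rest =>
    let stop := idx + chunk.length
    if k then
      [("num", (PySem.Int.ofChars? chunk).getD 0),
       ("start", if 0 < idx then (idx : Int) - 1 else (idx : Int)),
       ("stop", if stop < n then (stop : Int) else (stop : Int) - 1)]
        :: pvBuild n (idx + chunk.length) rest
    else pvBuild n (idx + chunk.length) rest

def find_nums_in_line_alt (line : String) : Option (List (List (String × Int))) :=
  let cs := line.toList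
  if cs.isEmpty then none
  else some (pvBuild cs.length 0 (pvRuns cs))

-- ===== PRECONDITION & SPEC =====
def Spec_find_nums_in_line (line : String) (out : Option (List (List (String × Int)))) : Prop := out = find_nums_in_line_alt line
instance (line : String) (out : Option (List (List (String × Int)))) : Decidable (Spec_find_nums_in_line line out) := by unfold Spec_find_nums_in_line; infer_instance

-- ===== CLAIM (what is proved, stated in full; the proofs are below) =====
def Claim_equal_find_nums_in_line : Prop := ∀ (line : String), Dom_find_nums_in_line line → Spec_find_nums_in_line line (find_nums_in_line line)

-- ===== LEMMAS AND PROOFS =====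

-- characterization of pvRuns on a nonempty list: head run = maximal same-key prefix
theorem pvRuns_cons (t : List Char) : ∀ (c : Char),
    pvRuns (c :: t)
      = (PySem.Chars.isdigit c,
          (c :: t).takeWhile (fun x => PySem.Chars.isdigit x == PySem.Chars.isdigit c))
        :: pvRuns ((c :: t).dropWhile (fun x => PySem.Chars.isdigit x == PySem.Chars.isdigit c)) := by
  induction t with
  | nil =>
    intro c
    simp [pvRuns]
  | cons d t' ih =>
    intro c
    by_cases hk : PySem.Chars.isdigit d = PySem.Chars.isdigit c
    · rw [show pvRuns (c :: d :: t')
          = (match pvRuns (d :: t') with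
             | (k', r) :: rest =>
                if k' == PySem.Chars.isdigit c then (PySem.Chars.isdigit c, c :: r) :: rest
                else (PySem.Chars.isdigit c, [c]) :: (k', r) :: rest
             | [] => [(PySem.Chars.isdigit c, [c])]) from rfl]
      rw [ih d]
      rw [hk]
      simp only [beq_self_eq_true, if_true]
      simp [List.takeWhile_cons, List.dropWhile_cons]
    · rw [show pvRuns (c :: d :: t')
          = (match pvRuns (d :: t') with
             | (k', r) :: rest =>
                if k' == PySem.Chars.isdigit c then (PySem.Chars.isdigit c, c :: r) :: rest
                else (PySem.Chars.isdigit c, [c]) :: (k', r) :: rest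
             | [] => [(PySem.Chars.isdigit c, [c])]) from rfl]
      rw [ih d]
      have hbeq : (PySem.Chars.isdigit d == PySem.Chars.isdigit c) = false := by simp [hk]
      simp only [hbeq, Bool.false_eq_true, if_false]
      rw [← ih d]
      simp [hk]

-- pvScanA collects exactly the digit prefix of the suffix at h
theorem pvScanA_eq (cs : List Char) : ∀ (t : List Char) (h : Nat) (cur : List Char),
    cs.drop h = t →
    pvScanA cs cs.length h cur
      = (h + (t.takeWhile PySem.Chars.isdigit).length, cur ++ t.takeWhile PySem.Chars.isdigit) := by
  intro t
  induction t with
  | nil =>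
    intro h cur hd
    have hle : cs.length ≤ h := by
      by_contra hlt
      rw [List.drop_eq_getElem_cons (Nat.lt_of_not_le hlt)] at hd
      cases hd
    rw [pvScanA]
    simp [Nat.not_lt.mpr hle]
  | cons c t' ih =>
    intro h cur hd
    have hlt : h < cs.length := by
      by_contra hge
      rw [List.drop_eq_nil_of_le (Nat.le_of_not_lt hge)] at hd
      cases hd
    have hcons := List.drop_eq_getElem_cons hlt
    rw [hd] at hcons
    have hc : cs[h] = c := by
      have := hcons.symm
      rw [List.cons.injEq] at this
      exact this.1
    have ht' : cs.drop (h + 1) = t' := by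
      have := hcons.symm
      rw [List.cons.injEq] at this
      exact this.2
    have hget : cs[h]? = some c := by rw [List.getElem?_eq_getElem hlt, hc]
    by_cases hdig : PySem.Chars.isdigit c
    · rw [pvScanA, dif_pos ⟨hlt, by simp [hget, hdig]⟩]
      simp only [hget, Option.getD_some]
      rw [ih (h + 1) (cur ++ [c]) ht']
      rw [List.takeWhile_cons, if_pos hdig]
      refine Prod.ext ?_ ?_
      · simp; omega
      · simp
    · rw [pvScanA, dif_neg (by simp [hget, hdig])]
      rw [List.takeWhile_cons, if_neg hdig]
      simp

-- A's outer loop jumps one-by-one over a block of non-digit characters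
theorem pvLoopA_skip (cs : List Char) : ∀ (ch rest : List Char) (j : Nat),
    cs.drop j = ch ++ rest → (∀ c ∈ ch, PySem.Chars.isdigit c = false) →
    pvLoopA cs cs.length j = pvLoopA cs cs.length (j + ch.length) := by
  intro ch
  induction ch with
  | nil => intro rest j _ _; simp
  | cons c ch' ih =>
    intro rest j hd hnd
    rw [List.cons_append] at hd
    have hlt : j < cs.length := by
      by_contra hge
      rw [List.drop_eq_nil_of_le (Nat.le_of_not_lt hge)] at hd
      cases hd
    have hcons := List.drop_eq_getElem_cons hlt
    rw [hd] at hcons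
    have hc : cs[j] = c := by
      have := hcons.symm; rw [List.cons.injEq] at this; exact this.1
    have ht' : cs.drop (j + 1) = ch' ++ rest := by
      have := hcons.symm; rw [List.cons.injEq] at this; exact this.2
    have hget : cs[j]? = some c := by rw [List.getElem?_eq_getElem hlt, hc]
    have hcnd : PySem.Chars.isdigit c = false := hnd c (by simp)
    rw [pvLoopA, dif_pos hlt]
    simp only [hget, Option.getD_some, hcnd, Bool.false_eq_true, if_false]
    rw [ih rest (j + 1) ht' (fun x hx => hnd x (by simp [hx]))]
    congr 1
    simp
    omega

-- main equivalence: A's scan from j = B's second pass over the runs of the suffix at j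
theorem pvMain (cs : List Char) : ∀ (n j : Nat), cs.length - j ≤ n →
    pvLoopA cs cs.length j = pvBuild cs.length j (pvRuns (cs.drop j)) := by
  intro n
  induction n with
  | zero =>
    intro j hj
    have hge : cs.length ≤ j := by omega
    rw [pvLoopA, dif_neg (by omega), List.drop_eq_nil_of_le hge]
    simp [pvRuns, pvBuild]
  | succ n ih =>
    intro j hj
    by_cases hlt : j < cs.length
    · have hcons := List.drop_eq_getElem_cons hlt
      have hget : cs[j]? = some cs[j] := List.getElem?_eq_getElem hlt
      rw [hcons, pvRuns_cons]
      by_cases hdig : PySem.Chars.isdigit cs[j]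
      · -- numeric run starting at j
        have hpred : (fun x => PySem.Chars.isdigit x == PySem.Chars.isdigit cs[j])
            = fun x => PySem.Chars.isdigit x := by
          funext x; rw [hdig]; simp
        rw [hpred]
        rw [List.takeWhile_cons, if_pos hdig, List.dropWhile_cons, if_pos hdig]
        set tw := (cs.drop (j + 1)).takeWhile PySem.Chars.isdigit with htw
        set dw := (cs.drop (j + 1)).dropWhile PySem.Chars.isdigit with hdw
        rw [pvBuild]
        simp only [hdig, if_true]
        -- A side
        rw [pvLoopA, dif_pos hlt]
        simp only [hget, Option.getD_some, hdig, if_true]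
        rw [pvScanA_eq cs (cs.drop (j + 1)) (j + 1) [cs[j]] rfl]
        dsimp only
        have hdrop_h : cs.drop (j + 1 + tw.length) = dw := by
          have h1 : (cs.drop (j + 1)).drop tw.length = dw := by
            conv_lhs => rw [← List.takeWhile_append_dropWhile (p := PySem.Chars.isdigit)
              (l := cs.drop (j + 1))]
            exact List.drop_left
          rw [← h1, List.drop_drop]
        have hlen : tw.length ≤ cs.length - (j + 1) := by
          have h1 : tw.length ≤ (cs.drop (j + 1)).length := by
            rw [htw]; exact (List.takeWhile_sublist _).length_le
          simpa using h1
        rw [ih (j + 1 + tw.length) (by omega), hdrop_h]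
        have harith : j + (cs[j] :: tw).length = j + 1 + tw.length := by simp; omega
        rw [harith]
        congr 2
      · -- non-numeric run starting at j
        have hf : PySem.Chars.isdigit cs[j] = false := by simpa using hdig
        have hpred : (fun x => PySem.Chars.isdigit x == PySem.Chars.isdigit cs[j])
            = fun x => !PySem.Chars.isdigit x := by
          funext x; rw [hf]; cases PySem.Chars.isdigit x <;> simp
        rw [hpred]
        set ch := (cs[j] :: cs.drop (j + 1)).takeWhile (fun x => !PySem.Chars.isdigit x) with hch
        set dw := (cs[j] :: cs.drop (j + 1)).dropWhile (fun x => !PySem.Chars.isdigit x) with hdw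
        rw [pvBuild]
        simp only [hf, Bool.false_eq_true, if_false]
        have hda : cs.drop j = ch ++ dw := by
          rw [hcons, hch, hdw, List.takeWhile_append_dropWhile]
        have hskip := pvLoopA_skip cs ch dw j hda (fun x hx => by
          have := List.mem_takeWhile_imp hx; simpa using this)
        rw [hskip]
        have hch1 : 0 < ch.length := by
          rw [hch, List.takeWhile_cons, if_pos (by simp [hf])]; simp
        have hdrop2 : cs.drop (j + ch.length) = dw := by
          have h1 : (cs.drop j).drop ch.length = dw := by
            rw [hda]; exact List.drop_left
          rw [List.drop_drop] at h1
          exact h1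
        rw [ih (j + ch.length) (by omega), hdrop2]
    · have hge : cs.length ≤ j := by omega
      rw [pvLoopA, dif_neg (by omega), List.drop_eq_nil_of_le hge]
      simp [pvRuns, pvBuild]

-- ===== VERDICT (by name: the statement is the Claim_ definition above) =====
theorem find_nums_in_line_spec : Claim_equal_find_nums_in_line := by
  intro line _
  unfold Spec_find_nums_in_line find_nums_in_line find_nums_in_line_alt
  by_cases h : line.toList.isEmpty
  · simp [h]
  · simp only [h, Bool.false_eq_true, if_false]
    have := pvMain line.toList line.toList.length 0 (by omega)
    simpa using this
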